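-- pv_equiv track=rewrite | github.com/Mayyarkmp/OMR---Python- | Circle_Detection.py | group_circles_into_rows
-- ===== SOURCE A (Python) =====
-- def group_circles_into_rows(circles, threshold=10):
--     rows = []
--     circles = sorted(circles, key=lambda x: x[1])  # Sort by y-coordinate
--
--     current_row = [circles[0]]
--     for circle in circles[1:]:
--         if abs(circle[1] - current_row[-1][1]) <= threshold:
--             current_row.append(circle)
--         else:
--             rows.append(current_row)
--             current_row = [circle]
--     rows.append(current_row)
--     return rows, len(rows)
-- ===== SOURCE B (Python) =====
-- def group_circles_into_rows(circles, threshold=10):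
--     s = sorted(circles, key=lambda x: x[1])
--     cuts = [0] + [i for i in range(1, len(s)) if abs(s[i][1] - s[i - 1][1]) > threshold] + [len(s)]
--     rows = [s[a:b] for a, b in zip(cuts, cuts[1:])]
--     return rows, len(rows)
-- ===== Notes on version B (the rewrite author's own statement) =====
-- stated objective: alternative
-- what changed: Replaces A's accumulator pass (growing current_row element by element) by computing the break indices of the sorted list and slicing it at those cut points; rows become slices instead of incrementally built lists.
-- outside the precondition, e.g. on group_circles_into_rows([], 10): A raises IndexError, B returns ([[]], 1)
import Mathlib
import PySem

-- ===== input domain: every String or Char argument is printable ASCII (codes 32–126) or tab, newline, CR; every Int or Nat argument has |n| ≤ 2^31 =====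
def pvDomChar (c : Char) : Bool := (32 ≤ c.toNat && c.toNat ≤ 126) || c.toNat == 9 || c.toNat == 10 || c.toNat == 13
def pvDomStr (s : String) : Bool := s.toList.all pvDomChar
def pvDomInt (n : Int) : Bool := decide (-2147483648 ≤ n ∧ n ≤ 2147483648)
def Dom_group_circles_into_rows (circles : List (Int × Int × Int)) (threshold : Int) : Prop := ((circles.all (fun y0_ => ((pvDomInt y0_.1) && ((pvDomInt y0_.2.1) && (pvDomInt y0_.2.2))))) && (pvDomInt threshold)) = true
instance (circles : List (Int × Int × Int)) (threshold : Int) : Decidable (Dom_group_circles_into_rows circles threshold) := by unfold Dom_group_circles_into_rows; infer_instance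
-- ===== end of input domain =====

-- B replaces A's accumulator pass (growing current_row element by element) by computing the
-- break indices of the sorted list once and slicing it at those cut points (objective: alternative,
-- same asymptotic cost). Equivalence is about the return value; neither version mutates its input.

-- ===== PORT A =====
-- A's loop body: append to the current row if the y-gap to its last circle is small, else close the row.
def pvStepA (threshold : Int) (st : List (List (Int × Int × Int)) × List (Int × Int × Int))
    (c : Int × Int × Int) : List (List (Int × Int × Int)) × List (Int × Int × Int) :=
  if |c.2.1 - (PySem.List.pyGetD st.2 (-1) (0, 0, 0)).2.1| ≤ threshold then
    (st.1, st.2 ++ [c])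
  else
    (st.1 ++ [st.2], [c])

def group_circles_into_rows (circles : List (Int × Int × Int)) (threshold : Int) :
    (List (List (Int × Int × Int))) × Int :=
  let s := PySem.List.sorted circles (fun x => x.2.1)
  match s with
  | [] => ([], 0)  -- Python raises IndexError at circles[0] here; excluded by Pre_
  | x :: rest =>
    let st := rest.foldl (pvStepA threshold) ([], [x])
    let rows := st.1 ++ [st.2]
    (rows, (rows.length : Int))

-- ===== PORT B =====
-- Source B's cut-point computation and slicing, on the already-sorted list s.
def pvChop (s : List (Int × Int × Int)) (threshold : Int) : List (List (Int × Int × Int)) :=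
  let n : Int := s.length
  let cuts : List Int :=
    [0] ++ ((PySem.List.pyRange 1 n).filter (fun i =>
      decide (threshold < |(PySem.List.pyGetD s i (0, 0, 0)).2.1 -
                           (PySem.List.pyGetD s (i - 1) (0, 0, 0)).2.1|))) ++ [n]
  (cuts.zip cuts.tail).map (fun p => PySem.List.slice s (some p.1) (some p.2))

def group_circles_into_rows_alt (circles : List (Int × Int × Int)) (threshold : Int) :
    (List (List (Int × Int × Int))) × Int :=
  let s := PySem.List.sorted circles (fun x => x.2.1)
  let rows := pvChop s threshold
  (rows, (rows.length : Int))

-- ===== PRECONDITION & SPEC =====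
-- Pre_ excludes only the empty circle list, on which the Python A raises IndexError (circles[0]).
def Pre_group_circles_into_rows (circles : List (Int × Int × Int)) (threshold : Int) : Prop :=
  circles ≠ []
instance (circles : List (Int × Int × Int)) (threshold : Int) : Decidable (Pre_group_circles_into_rows circles threshold) := by unfold Pre_group_circles_into_rows; infer_instance

def pvWitness_group_circles_into_rows : (List (Int × Int × Int)) × Int := ([(1, 2, 3)], 10)

def Spec_group_circles_into_rows (circles : List (Int × Int × Int)) (threshold : Int) (out : (List (List (Int × Int × Int))) × Int) : Prop := out = group_circles_into_rows_alt circles threshold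
instance (circles : List (Int × Int × Int)) (threshold : Int) (out : (List (List (Int × Int × Int))) × Int) : Decidable (Spec_group_circles_into_rows circles threshold out) := by unfold Spec_group_circles_into_rows; infer_instance

-- ===== CLAIM (what is proved, stated in full; the proofs are below) =====
def Claim_equal_group_circles_into_rows : Prop := ∀ (circles : List (Int × Int × Int)) (threshold : Int), Dom_group_circles_into_rows circles threshold → Pre_group_circles_into_rows circles threshold → Spec_group_circles_into_rows circles threshold (group_circles_into_rows circles threshold)

-- ===== LEMMAS AND PROOFS =====

-- the break predicate of pvChop, named for the lemmas
def pvBrk (s : List (Int × Int × Int)) (threshold : Int) (i : Int) : Bool :=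
  decide (threshold < |(PySem.List.pyGetD s i (0, 0, 0)).2.1 -
                       (PySem.List.pyGetD s (i - 1) (0, 0, 0)).2.1|)

def pvCuts (s : List (Int × Int × Int)) (threshold : Int) : List Int :=
  (PySem.List.pyRange 1 (s.length : Int)).filter (pvBrk s threshold)

lemma pvChop_eq (s : List (Int × Int × Int)) (t : Int) :
    pvChop s t = (((0 : Int) :: pvCuts s t).zip (pvCuts s t ++ [(s.length : Int)])).map
      (fun p => PySem.List.slice s (some p.1) (some p.2)) := by
  have hz : ∀ (f : List Int) (n : Int), ((0 :: (f ++ [n])).zip (f ++ [n])) = ((0 :: f).zip (f ++ [n])) := by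
    intro f n
    have h := List.zip_append (l₁ := (0 : Int) :: f) (r₁ := [n])
      (l₂ := f ++ [n]) (r₂ := ([] : List Int)) (by simp)
    simpa using h
  unfold pvChop
  exact congrArg _ (hz _ _)

lemma pvCuts_mem (s : List (Int × Int × Int)) (t : Int) {i : Int} (h : i ∈ pvCuts s t) :
    1 ≤ i ∧ i < (s.length : Int) := by
  unfold pvCuts at h
  exact PySem.List.mem_pyRange_one.mp (List.mem_of_mem_filter h)

-- indexing below the old length is unchanged by a snoc
lemma pvGetD_snoc_lt (s : List (Int × Int × Int)) (c d : Int × Int × Int) {i : Int}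
    (h0 : 0 ≤ i) (h : i < (s.length : Int)) :
    PySem.List.pyGetD (s ++ [c]) i d = PySem.List.pyGetD s i d := by
  have hi : i.toNat < s.length := by omega
  rw [PySem.List.pyGetD_eq_getElem _ d h0 (by simp; omega),
      PySem.List.pyGetD_eq_getElem _ d h0 h]
  exact List.getElem_append_left hi

lemma pvSlice_snoc_lo (s : List (Int × Int × Int)) (c : Int × Int × Int) {a b : Int}
    (h0 : 0 ≤ a) (h1 : 0 ≤ b) (h2 : b ≤ (s.length : Int)) :
    PySem.List.slice (s ++ [c]) (some a) (some b) = PySem.List.slice s (some a) (some b) := by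
  rw [PySem.List.slice_toNat _ h0 h1, PySem.List.slice_toNat _ h0 h1]
  by_cases ha : a.toNat ≤ s.length
  · rw [List.drop_append_of_le_length ha]
    have h4 : b.toNat - a.toNat ≤ (List.drop a.toNat s).length := by
      simp [List.length_drop]; omega
    rw [List.take_append_of_le_length h4]
  · have hb0 : b.toNat - a.toNat = 0 := by omega
    simp [hb0]

lemma pvSlice_snoc_hi (s : List (Int × Int × Int)) (c : Int × Int × Int) {a : Int}
    (h0 : 0 ≤ a) (h1 : a ≤ (s.length : Int)) :
    PySem.List.slice (s ++ [c]) (some a) (some ((s.length : Int) + 1)) =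
      PySem.List.slice s (some a) (some (s.length : Int)) ++ [c] := by
  rw [PySem.List.slice_toNat _ h0 (by positivity), PySem.List.slice_toNat _ h0 (by positivity)]
  have ha : a.toNat ≤ s.length := by omega
  rw [List.drop_append_of_le_length ha]
  have h4 : ((s.length : Int) + 1).toNat - a.toNat = (List.drop a.toNat s ++ [c]).length := by
    simp [List.length_drop]; omega
  have h5 : (s.length : Int).toNat - a.toNat = (List.drop a.toNat s).length := by
    simp [List.length_drop]
  rw [h4, List.take_length, h5, List.take_length]

-- the break test at the seam of a snoc is the gap to the old last element
lemma pvBrk_snoc_boundary (s : List (Int × Int × Int)) (c : Int × Int × Int) (t : Int)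
    (hs : s ≠ []) :
    pvBrk (s ++ [c]) t (s.length : Int) = decide (t < |c.2.1 - (s.getLast hs).2.1|) := by
  have hlen : 0 < s.length := List.length_pos_iff.mpr hs
  have h1 : PySem.List.pyGetD (s ++ [c]) (s.length : Int) (0, 0, 0) = c := by
    simp [PySem.List.pyGetD_natCast, List.getD_eq_getElem?_getD]
  have h2 : PySem.List.pyGetD (s ++ [c]) ((s.length : Int) - 1) (0, 0, 0) = s.getLast hs := by
    rw [show ((s.length : Int) - 1) = ((s.length - 1 : Nat) : Int) by omega,
        PySem.List.pyGetD_natCast, List.getD_eq_getElem _ _ (by simp),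
        List.getLast_eq_getElem]
    exact List.getElem_append_left (by omega)
  unfold pvBrk
  rw [h1, h2]

-- the break tests below the seam are unchanged by a snoc
lemma pvBrk_snoc_lt (s : List (Int × Int × Int)) (c : Int × Int × Int) (t : Int) :
    ∀ i ∈ PySem.List.pyRange 1 (s.length : Int), pvBrk (s ++ [c]) t i = pvBrk s t i := by
  intro i hi
  obtain ⟨hi1, hi2⟩ := PySem.List.mem_pyRange_one.mp hi
  unfold pvBrk
  rw [pvGetD_snoc_lt s c _ (by omega) hi2, pvGetD_snoc_lt s c _ (by omega) (by omega)]

-- cut list after a snoc: unchanged when the new gap is small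
lemma pvCuts_snoc_le (s : List (Int × Int × Int)) (c : Int × Int × Int) (t : Int)
    (hs : s ≠ []) (hle : |c.2.1 - (s.getLast hs).2.1| ≤ t) :
    pvCuts (s ++ [c]) t = pvCuts s t := by
  have hlen : 0 < s.length := List.length_pos_iff.mpr hs
  unfold pvCuts
  rw [show (((s ++ [c]).length : Int)) = (s.length : Int) + 1 by simp,
      PySem.List.pyRange_one_succ_right (by omega), List.filter_append,
      List.filter_congr (pvBrk_snoc_lt s c t)]
  simp [pvBrk_snoc_boundary s c t hs, not_lt.mpr hle]

-- cut list after a snoc: one new cut at the old length when the new gap is large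
lemma pvCuts_snoc_gt (s : List (Int × Int × Int)) (c : Int × Int × Int) (t : Int)
    (hs : s ≠ []) (hgt : t < |c.2.1 - (s.getLast hs).2.1|) :
    pvCuts (s ++ [c]) t = pvCuts s t ++ [(s.length : Int)] := by
  have hlen : 0 < s.length := List.length_pos_iff.mpr hs
  unfold pvCuts
  rw [show (((s ++ [c]).length : Int)) = (s.length : Int) + 1 by simp,
      PySem.List.pyRange_one_succ_right (by omega), List.filter_append,
      List.filter_congr (pvBrk_snoc_lt s c t)]
  simp [pvBrk_snoc_boundary s c t hs, hgt]

-- extending the last row through the zipped slices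
lemma pvChop_snoc_le_aux (s : List (Int × Int × Int)) (c : Int × Int × Int) :
    ∀ (cuts : List Int) (a : Int),
      (∀ i ∈ a :: cuts, 0 ≤ i ∧ i ≤ (s.length : Int)) →
      ∀ F C, ((a :: cuts).zip (cuts ++ [(s.length : Int)])).map
               (fun p => PySem.List.slice s (some p.1) (some p.2)) = F ++ [C] →
        ((a :: cuts).zip (cuts ++ [(s.length : Int) + 1])).map
               (fun p => PySem.List.slice (s ++ [c]) (some p.1) (some p.2)) = F ++ [C ++ [c]] := by
  intro cuts
  induction cuts with
  | nil =>
    intro a hmem F C hFC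
    obtain ⟨ha0, ha1⟩ := hmem a (by simp)
    simp only [List.nil_append, List.zip_cons_cons, List.zip_nil_right, List.map_cons,
      List.map_nil] at hFC ⊢
    cases F with
    | nil =>
      simp only [List.nil_append, List.cons.injEq, and_true] at hFC
      simp [pvSlice_snoc_hi s c ha0 ha1, hFC]
    | cons f F' => simpa using congrArg List.length hFC
  | cons b cuts ih =>
    intro a hmem F C hFC
    obtain ⟨ha0, ha1⟩ := hmem a (by simp)
    obtain ⟨hb0, hb1⟩ := hmem b (by simp)
    simp only [List.cons_append, List.zip_cons_cons, List.map_cons] at hFC ⊢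
    cases F with
    | nil =>
      exfalso
      have hlen := congrArg List.length hFC
      simp [List.length_zip] at hlen
    | cons f F' =>
      simp only [List.cons_append, List.cons.injEq] at hFC
      obtain ⟨hf, hrest⟩ := hFC
      rw [pvSlice_snoc_lo s c ha0 hb0 hb1, hf,
          ih b (fun i hi => hmem i (by simpa using Or.inr hi)) F' C hrest]
      simp

lemma pvChop_snoc_le (s : List (Int × Int × Int)) (c : Int × Int × Int) (t : Int)
    (hs : s ≠ []) (hle : |c.2.1 - (s.getLast hs).2.1| ≤ t)
    {F : List (List (Int × Int × Int))} {C : List (Int × Int × Int)}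
    (h : pvChop s t = F ++ [C]) :
    pvChop (s ++ [c]) t = F ++ [C ++ [c]] := by
  rw [pvChop_eq] at h ⊢
  rw [pvCuts_snoc_le s c t hs hle,
      show (((s ++ [c]).length : Int)) = (s.length : Int) + 1 by simp]
  exact pvChop_snoc_le_aux s c (pvCuts s t) 0
    (by
      intro i hi
      rcases List.mem_cons.mp hi with h0 | h0
      · omega
      · have := pvCuts_mem s t h0; omega)
    F C h

lemma pvChop_snoc_gt (s : List (Int × Int × Int)) (c : Int × Int × Int) (t : Int)
    (hs : s ≠ []) (hgt : t < |c.2.1 - (s.getLast hs).2.1|) :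
    pvChop (s ++ [c]) t = pvChop s t ++ [[c]] := by
  rw [pvChop_eq, pvChop_eq, pvCuts_snoc_gt s c t hs hgt,
      show (((s ++ [c]).length : Int)) = (s.length : Int) + 1 by simp]
  have hzip : ((0 : Int) :: (pvCuts s t ++ [(s.length : Int)])).zip
      ((pvCuts s t ++ [(s.length : Int)]) ++ [(s.length : Int) + 1]) =
      (((0 : Int) :: pvCuts s t).zip (pvCuts s t ++ [(s.length : Int)])) ++
        [((s.length : Int), (s.length : Int) + 1)] := by
    have h := List.zip_append (l₁ := (0 : Int) :: pvCuts s t) (r₁ := [(s.length : Int)])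
      (l₂ := pvCuts s t ++ [(s.length : Int)]) (r₂ := [(s.length : Int) + 1]) (by simp)
    simpa using h
  rw [hzip, List.map_append]
  congr 1
  · apply List.map_congr_left
    intro p hp
    obtain ⟨hp1, hp2⟩ := List.of_mem_zip hp
    have h1 : 0 ≤ p.1 := by
      rcases List.mem_cons.mp hp1 with h0 | h0
      · omega
      · have := pvCuts_mem s t h0; omega
    have h2 : 0 ≤ p.2 ∧ p.2 ≤ (s.length : Int) := by
      rcases List.mem_append.mp hp2 with h0 | h0
      · have := pvCuts_mem s t h0; omega
      · simp at h0; omega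
    exact pvSlice_snoc_lo s c h1 h2.1 h2.2
  · have hnn : PySem.List.slice s (some (s.length : Int)) (some (s.length : Int)) = [] := by
      rw [PySem.List.slice_toNat _ (by positivity) (by positivity)]
      simp
    simp [pvSlice_snoc_hi s c (Int.natCast_nonneg _) le_rfl, hnn]

lemma pvChop_singleton (x : Int × Int × Int) (t : Int) : pvChop [x] t = [[x]] := by
  rw [pvChop_eq]
  have hc : pvCuts [x] t = [] := by
    unfold pvCuts
    rw [show (([x] : List (Int × Int × Int)).length : Int) = 1 by simp,
        PySem.List.pyRange_one_eq_nil le_rfl]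
    rfl
  rw [hc]
  norm_num [PySem.List.slice_toNat]

-- the loop invariant of A's fold, against B's chop of the same list
lemma pvInv (t : Int) (rest : List (Int × Int × Int)) (x : Int × Int × Int) :
    ∃ F C, rest.foldl (pvStepA t) ([], [x]) = (F, C) ∧
      F ++ [C] = pvChop (x :: rest) t ∧ C ≠ [] ∧ C.getLast? = (x :: rest).getLast? := by
  induction rest using List.reverseRecOn with
  | nil =>
    exact ⟨[], [x], rfl, by simp [pvChop_singleton], by simp, rfl⟩
  | append_singleton ys c ih =>
    obtain ⟨F, C, hfold, hchop, hC, hlast⟩ := ih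
    have hs : (x :: ys) ≠ [] := List.cons_ne_nil x ys
    have hCl : C.getLast hC = (x :: ys).getLast hs := by
      have h1 := List.getLast?_eq_some_getLast (l := C) hC
      have h2 := List.getLast?_eq_some_getLast (l := x :: ys) hs
      rw [h1, h2] at hlast
      exact Option.some.inj hlast
    have hfold' : (ys ++ [c]).foldl (pvStepA t) ([], [x]) = pvStepA t (F, C) c := by
      rw [List.foldl_append, hfold]
      rfl
    have hgetD : PySem.List.pyGetD C (-1) (0, 0, 0) = (x :: ys).getLast hs := by
      rw [PySem.List.pyGetD_neg_one C _ hC, hCl]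
    by_cases hle : |c.2.1 - ((x :: ys).getLast hs).2.1| ≤ t
    · refine ⟨F, C ++ [c], ?_, ?_, by simp, by rw [show (x :: (ys ++ [c])).getLast? = ((x :: ys) ++ [c]).getLast? from rfl, List.getLast?_concat (l := x :: ys), List.getLast?_concat]⟩
      · rw [hfold']
        unfold pvStepA
        rw [hgetD, if_pos hle]
      · rw [show x :: (ys ++ [c]) = (x :: ys) ++ [c] from rfl]
        exact (pvChop_snoc_le (x :: ys) c t hs hle hchop.symm).symm
    · refine ⟨F ++ [C], [c], ?_, ?_, by simp, by rw [show (x :: (ys ++ [c])).getLast? = ((x :: ys) ++ [c]).getLast? from rfl, List.getLast?_concat (l := x :: ys)]; rfl⟩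
      · rw [hfold']
        unfold pvStepA
        rw [hgetD, if_neg hle]
      · rw [show x :: (ys ++ [c]) = (x :: ys) ++ [c] from rfl,
            pvChop_snoc_gt (x :: ys) c t hs (not_le.mp hle), ← hchop]

-- ===== VERDICT (by name: the statement is the Claim_ definition above) =====
theorem group_circles_into_rows_spec : Claim_equal_group_circles_into_rows := by
  intro circles t _ hpre
  unfold Spec_group_circles_into_rows group_circles_into_rows group_circles_into_rows_alt
  have hs : PySem.List.sorted circles (fun x => x.2.1) ≠ [] := by
    simpa [PySem.List.sorted_eq_nil_iff] using hpre
  rcases hx : PySem.List.sorted circles (fun x => x.2.1) with _ | ⟨x, rest⟩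
  · exact absurd hx hs
  · obtain ⟨F, C, hfold, hchop, -, -⟩ := pvInv t rest x
    simp [hfold, hchop]
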